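-- pv_equiv track=rewrite | github.com/aajay101/Huffman-Coding--DAA-project | backend/huffman_engine.py | _unpack_bytes
-- ===== SOURCE A (Python) =====
-- def _unpack_bytes(payload, padding_bits):
--     bits = []
--     for byte_value in payload:
--         for shift in range(7, -1, -1):
--             bits.append("1" if byte_value & (1 << shift) else "0")
--
--     if padding_bits:
--         bits = bits[:-padding_bits]
--     return "".join(bits)
-- ===== SOURCE B (Python) =====
-- def _unpack_bytes(payload, padding_bits):
--     n = len(payload)
--     if n == 0:
--         bits = ""
--     else:
--         value = int.from_bytes(bytes(b & 0xFF for b in payload), "big")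
--         bits = format(value, "b").zfill(8 * n)
--     return bits[:-padding_bits] if padding_bits else bits
-- ===== Notes on version B (the rewrite author's own statement) =====
-- stated objective: faster
-- what changed: Replaces the nested per-byte/per-shift mask-test loops and the accumulator list with a single big-integer conversion: int.from_bytes of the masked payload formatted as fixed-width binary (format(...,'b').zfill(8*n)), then the same padding trim.
import Mathlib
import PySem

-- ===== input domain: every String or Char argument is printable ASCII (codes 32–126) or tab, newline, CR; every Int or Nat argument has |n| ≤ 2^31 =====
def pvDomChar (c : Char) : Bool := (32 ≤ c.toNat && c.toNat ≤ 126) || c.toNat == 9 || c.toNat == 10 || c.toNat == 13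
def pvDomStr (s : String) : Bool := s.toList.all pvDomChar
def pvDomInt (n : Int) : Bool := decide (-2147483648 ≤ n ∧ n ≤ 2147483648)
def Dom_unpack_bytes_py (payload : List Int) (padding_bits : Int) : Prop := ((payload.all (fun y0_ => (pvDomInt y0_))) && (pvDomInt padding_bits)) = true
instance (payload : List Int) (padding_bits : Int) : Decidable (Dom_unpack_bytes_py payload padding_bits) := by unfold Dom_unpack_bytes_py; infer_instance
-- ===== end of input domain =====

-- B replaces A's nested per-byte/per-shift bit-test loops with one big-integer
-- conversion (base-256 fold, fixed-width binary via format+zfill): idiomatic, same results.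


-- ===== PORT A =====
-- Literal port of A: for each byte, for shift in range(7,-1,-1) append "1"/"0"
-- (`byte & (1 << shift)` truthy ⟺ ≠ 0; shift is 7..0 so `.toNat` is exact);
-- then bits[:-padding_bits] when padding_bits is truthy; finally "".join(bits).
def unpack_bytes_py (payload : List Int) (padding_bits : Int) : String :=
  let bits : List String := payload.foldl (fun bits byte_value =>
    (PySem.List.pyRange 7 (-1) (-1)).foldl (fun bits shift =>
      bits ++ [if PySem.Int.band byte_value ((1:Int) <<< shift.toNat) ≠ 0 then "1" else "0"]) bits) []
  let bits := if padding_bits ≠ 0 then PySem.List.slice bits none (some (-padding_bits)) else bits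
  PySem.Str.join "" bits

-- ===== PORT B =====
-- Literal port of Source B: int.from_bytes(bytes(b & 0xFF for b in payload), "big") is the
-- big-endian base-256 value (ported as the standard left fold); format(value, "b") is
-- PySem.Int.toBinChars, .zfill(8*n) is PySem.Chars.zfill; same padding trim.
def unpack_bytes_py_alt (payload : List Int) (padding_bits : Int) : String :=
  let n : Nat := payload.length
  let bits : List Char :=
    if n = 0 then []
    else
      let value : Int := payload.foldl (fun v b => v * 256 + PySem.Int.band b 255) 0
      PySem.Chars.zfill (PySem.Int.toBinChars value) (8 * (n : Int))
  let bits := if padding_bits ≠ 0 then PySem.Chars.slice bits none (some (-padding_bits)) else bits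
  String.ofList bits

-- ===== PRECONDITION & SPEC =====
def Spec_unpack_bytes_py (payload : List Int) (padding_bits : Int) (out : String) : Prop := out = unpack_bytes_py_alt payload padding_bits
instance (payload : List Int) (padding_bits : Int) (out : String) : Decidable (Spec_unpack_bytes_py payload padding_bits out) := by unfold Spec_unpack_bytes_py; infer_instance

-- ===== CLAIM (what is proved, stated in full; the proofs are below) =====
def Claim_equal_unpack_bytes_py : Prop := ∀ (payload : List Int) (padding_bits : Int), Dom_unpack_bytes_py payload padding_bits → Spec_unpack_bytes_py payload padding_bits (unpack_bytes_py payload padding_bits)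

-- ===== LEMMAS AND PROOFS =====

def pvBin : Nat → Nat → List Char
  | 0, _ => []
  | w+1, v => pvBin w (v / 2) ++ [if v % 2 = 1 then '1' else '0']
def pvMinBits (v : Nat) : List Char :=
  if h : v / 2 = 0 then [Nat.digitChar (v % 2)]
  else pvMinBits (v / 2) ++ [Nat.digitChar (v % 2)]
decreasing_by exact Nat.div_lt_self (by omega) (by omega)

theorem pvToDigitsCore_eq (fuel : Nat) : ∀ n ds, n < fuel →
    Nat.toDigitsCore 2 fuel n ds = pvMinBits n ++ ds := by
  induction fuel with
  | zero => omega
  | succ fuel ih =>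
    intro n ds h
    rw [Nat.toDigitsCore]
    by_cases h2 : n / 2 = 0
    · simp [h2, pvMinBits]
    · rw [if_neg h2, ih _ _ (by omega)]
      conv_rhs => rw [pvMinBits, dif_neg h2]
      simp

theorem pvToDigits_eq (n : Nat) : Nat.toDigits 2 n = pvMinBits n := by
  rw [Nat.toDigits, pvToDigitsCore_eq _ _ _ (by omega)]; simp

theorem pvMinBits_mem (v : Nat) : ∀ c ∈ pvMinBits v, c = '0' ∨ c = '1' := by
  induction v using pvMinBits.induct with
  | case1 v h =>
    rw [pvMinBits, dif_pos h]
    have := Nat.mod_two_eq_zero_or_one v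
    rcases this with h1 | h1 <;> simp [h1, Nat.digitChar]
  | case2 v h ih =>
    rw [pvMinBits, dif_neg h]
    intro c hc
    rcases List.mem_append.1 hc with hc | hc
    · exact ih c hc
    · have := Nat.mod_two_eq_zero_or_one v
      rcases this with h1 | h1 <;> simp_all [Nat.digitChar]

theorem pvMinBits_ne_nil (v : Nat) : pvMinBits v ≠ [] := by
  rw [pvMinBits]; split <;> simp

theorem pvBin_zero (w : Nat) : pvBin w 0 = List.replicate w '0' := by
  induction w with
  | zero => rfl
  | succ w ih => simp [pvBin, ih, List.replicate_succ' ]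

theorem pvBin_eq_replicate (W : Nat) : ∀ v, v < 2^W → 1 ≤ W →
    pvBin W v = List.replicate (W - (pvMinBits v).length) '0' ++ pvMinBits v
      ∧ (pvMinBits v).length ≤ W := by
  induction W with
  | zero => omega
  | succ W ih =>
    intro v hv _
    by_cases h2 : v / 2 = 0
    · have hv2 : v < 2 := by omega
      have hbits : pvMinBits v = [Nat.digitChar (v % 2)] := by rw [pvMinBits, dif_pos h2]
      constructor
      · show pvBin W (v / 2) ++ _ = _
        rw [h2, pvBin_zero, hbits]
        have : (if v % 2 = 1 then '1' else '0') = Nat.digitChar (v % 2) := by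
          rcases Nat.mod_two_eq_zero_or_one v with h1 | h1 <;> simp [h1, Nat.digitChar]
        simp [this]
      · rw [hbits]; simp
    · have hW : 1 ≤ W := by
        by_contra h
        have : W = 0 := by omega
        subst this; omega
      obtain ⟨ih1, ih2⟩ := ih (v / 2) (by omega) hW
      have hbits : pvMinBits v = pvMinBits (v / 2) ++ [Nat.digitChar (v % 2)] := by
        rw [pvMinBits, dif_neg h2]
      have hc : (if v % 2 = 1 then '1' else '0') = Nat.digitChar (v % 2) := by
        rcases Nat.mod_two_eq_zero_or_one v with h1 | h1 <;> simp [h1, Nat.digitChar]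
      constructor
      · show pvBin W (v / 2) ++ _ = _
        rw [ih1, hbits, hc]
        have : W + 1 - (pvMinBits (v / 2) ++ [Nat.digitChar (v % 2)]).length
            = W - (pvMinBits (v / 2)).length := by simp
        rw [this]; simp
      · rw [hbits]; simp
        omega

theorem pvZfill_digits (cs : List Char) (W : Int) (h0 : cs ≠ [])
    (h1 : ∀ c ∈ cs, c = '0' ∨ c = '1') :
    PySem.Chars.zfill cs W = List.replicate (W.toNat - cs.length) '0' ++ cs := by
  unfold PySem.Chars.zfill
  by_cases h : W ≤ (cs.length : Int)
  · rw [if_pos h]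
    have : W.toNat - cs.length = 0 := by omega
    rw [this]; simp
  · rw [if_neg h]
    match cs, h0 with
    | c :: rest, _ =>
      have hc := h1 c (by simp)
      have : ¬ (c = '+' ∨ c = '-') := by rcases hc with h | h <;> simp [h]
      simp only [this, if_false]

theorem pvBand255 (b : Int) : PySem.Int.band b 255 = b % 256 := by
  rw [PySem.Int.band]
  by_cases hb : 0 ≤ b
  · rw [if_pos hb, if_pos (by norm_num)]
    have : b.toNat &&& (255:Int).toNat = b.toNat % 256 := by
      show b.toNat &&& 255 = _
      have h255 : (255:Nat) = 2^8 - 1 := by norm_num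
      rw [h255, Nat.and_two_pow_sub_one_eq_mod]
    rw [this]; omega
  · rw [if_neg hb, if_pos (by norm_num)]
    have : (255:Int).toNat &&& (-b - 1).toNat = (-b - 1).toNat % 256 := by
      show 255 &&& (-b - 1).toNat = _
      rw [Nat.land_comm]
      have h255 : (255:Nat) = 2^8 - 1 := by norm_num
      rw [h255, Nat.and_two_pow_sub_one_eq_mod]
    rw [this]
    omega

set_option maxRecDepth 100000 in
theorem pvTestBitFlip : ∀ s < 8, ∀ x < 256, (255 - x).testBit s = !(x.testBit s) := by decide

theorem pvBandPow (b : Int) (s : Nat) (hs : s < 8) :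
    PySem.Int.band b ((2:Int)^s) = ((b % 256).toNat &&& 2^s : Nat) := by
  have hp : (0:Int) ≤ 2^s := by positivity
  have hpt : ((2:Int)^s).toNat = 2^s := by
    rw [show ((2:Int)) = ((2:Nat):Int) by norm_num, ← Nat.cast_pow, Int.toNat_natCast]
  rw [PySem.Int.band]
  by_cases hb : 0 ≤ b
  · rw [if_pos hb, if_pos hp, hpt]
    congr 1
    have h1 : (b % 256).toNat = b.toNat % 256 := by omega
    rw [h1,
      show (256:Nat) = 2^8 by norm_num,
      Nat.and_two_pow, Nat.and_two_pow, Nat.testBit_mod_two_pow]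
    simp [hs]
  · rw [if_neg hb, if_pos hp, hpt]
    set m := (-b - 1).toNat with hm
    have h1 : (b % 256).toNat = 255 - m % 256 := by omega
    rw [h1]
    have hland : 2^s &&& m = (m.testBit s).toNat * 2^s := by
      rw [Nat.land_comm, Nat.and_two_pow]
    have h2 : (255 - m % 256) &&& 2^s = (((255 - m % 256).testBit s)).toNat * 2^s := by
      rw [Nat.and_two_pow]
    have h3 : (255 - m % 256).testBit s = !(m.testBit s) := by
      rw [pvTestBitFlip s hs (m % 256) (by omega)]
      rw [show (256:Nat) = 2^8 by norm_num, Nat.testBit_mod_two_pow]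
      simp [hs]
    rw [hland, h2, h3]
    cases m.testBit s <;> simp <;> omega

theorem pvBin_split (k : Nat) : ∀ w V m, m < 2^k →
    pvBin (w + k) (V * 2^k + m) = pvBin w V ++ pvBin k m := by
  induction k with
  | zero =>
    intro w V m h
    have : m = 0 := by omega
    subst this; simp [pvBin]
  | succ k ih =>
    intro w V m h
    have h2k : 2^(k+1) = 2 * 2^k := by rw [Nat.pow_succ]; ring
    show pvBin (w + k + 1) _ = _
    rw [pvBin]
    have hV : V * 2^(k+1) = 2 * (V * 2^k) := by rw [h2k]; ring
    have hd : (V * 2^(k+1) + m) / 2 = V * 2^k + m / 2 := by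
      rw [hV]; generalize V * 2^k = x; omega
    have hm2 : (V * 2^(k+1) + m) % 2 = m % 2 := by
      rw [hV]; generalize V * 2^k = x; omega
    rw [hd, hm2, ih w V (m / 2) (by omega), pvBin]
    simp

set_option maxRecDepth 100000 in
theorem pvByteA (r : Nat) (hr : r < 256) :
    [if ((r &&& 128 : Nat) : Int) ≠ 0 then ("1":String) else "0",
     if ((r &&& 64 : Nat) : Int) ≠ 0 then "1" else "0",
     if ((r &&& 32 : Nat) : Int) ≠ 0 then "1" else "0",
     if ((r &&& 16 : Nat) : Int) ≠ 0 then "1" else "0",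
     if ((r &&& 8 : Nat) : Int) ≠ 0 then "1" else "0",
     if ((r &&& 4 : Nat) : Int) ≠ 0 then "1" else "0",
     if ((r &&& 2 : Nat) : Int) ≠ 0 then "1" else "0",
     if ((r &&& 1 : Nat) : Int) ≠ 0 then "1" else "0"].map String.toList
    = (pvBin 8 r).map (fun c => [c]) := by
  simp only [ne_eq, Nat.cast_eq_zero]
  revert hr
  revert r
  decide

def pvF (payload : List Int) : Int := payload.foldl (fun v b => v * 256 + b % 256) 0

theorem pvF_bounds (payload : List Int) :
    0 ≤ pvF payload ∧ pvF payload < (256:Int)^payload.length := by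
  induction payload using List.reverseRecOn with
  | nil => simp [pvF]
  | append_singleton xs x ih =>
    have hF : pvF (xs ++ [x]) = pvF xs * 256 + x % 256 := by
      simp [pvF, List.foldl_append]
    have hm : 0 ≤ x % 256 ∧ x % 256 < 256 := ⟨Int.emod_nonneg x (by norm_num), Int.emod_lt_of_pos x (by norm_num)⟩
    have hp : (256:Int)^(xs ++ [x]).length = 256^xs.length * 256 := by
      simp [pow_succ]
    rw [hF, hp]
    obtain ⟨ih1, ih2⟩ := ih
    constructor
    · nlinarith
    · nlinarith

theorem pvF_bin (payload : List Int) : payload ≠ [] →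
    pvBin (8 * payload.length) (pvF payload).toNat
      = payload.flatMap (fun b => pvBin 8 ((b % 256).toNat)) := by
  induction payload using List.reverseRecOn with
  | nil => simp
  | append_singleton xs x ih =>
    intro _
    have hm : 0 ≤ x % 256 ∧ x % 256 < 256 := ⟨Int.emod_nonneg x (by norm_num), Int.emod_lt_of_pos x (by norm_num)⟩
    have hF : pvF (xs ++ [x]) = pvF xs * 256 + x % 256 := by
      simp [pvF, List.foldl_append]
    rcases List.eq_nil_or_concat xs with hxs | _
    case inl =>
      subst hxs
      simp only [List.nil_append, List.flatMap_cons, List.flatMap_nil, List.append_nil,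
        List.length_cons, List.length_nil]
      have : pvF [x] = x % 256 := by simp [pvF]
      rw [this]
    case inr =>
      have hxne : xs ≠ [] := by rcases ‹∃ _, _› with ⟨l, a, rfl⟩; simp
      obtain ⟨hb1, hb2⟩ := pvF_bounds xs
      have hlen : (xs ++ [x]).length = xs.length + 1 := by simp
      have htn : (pvF (xs ++ [x])).toNat = (pvF xs).toNat * 256 + (x % 256).toNat := by
        rw [hF]; omega
      have hpow : (pvF xs).toNat < 2^(8 * xs.length) := by
        have : ((256:Int))^xs.length = ((2:Int))^(8 * xs.length) := by
          rw [pow_mul]; norm_num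
        have h2 : pvF xs < 2^(8*xs.length) := this ▸ hb2
        have h3 : ((2:Int))^(8*xs.length) = ((2^(8*xs.length) : Nat) : Int) := by push_cast; ring
        omega
      rw [hlen, htn, Nat.mul_add, Nat.mul_one,
        show (256:Nat) = 2^8 by norm_num,
        pvBin_split 8 (8 * xs.length) ((pvF xs).toNat) _ (by omega),
        ih hxne]
      simp

theorem pvStrs (b : Int) :
    (PySem.List.pyRange 7 (-1) (-1)).map
      (fun shift => if PySem.Int.band b ((1:Int) <<< shift.toNat) ≠ 0 then "1" else "0")
    = (pvBin 8 ((b % 256).toNat)).map (fun c => String.ofList [c]) := by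
  have hrange : PySem.List.pyRange 7 (-1) (-1) = [7,6,5,4,3,2,1,0] := by decide
  rw [hrange]
  simp only [List.map]
  have hr : (b % 256).toNat < 256 := by
    have := Int.emod_nonneg b (show (256:Int) ≠ 0 by norm_num)
    have := Int.emod_lt_of_pos b (show (0:Int) < 256 by norm_num)
    omega
  have h7 : ((1:Int) <<< (((7:Int).toNat : Nat) : Int)) = 2^7 := by decide
  have h6 : ((1:Int) <<< (((6:Int).toNat : Nat) : Int)) = 2^6 := by decide
  have h5 : ((1:Int) <<< (((5:Int).toNat : Nat) : Int)) = 2^5 := by decide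
  have h4 : ((1:Int) <<< (((4:Int).toNat : Nat) : Int)) = 2^4 := by decide
  have h3 : ((1:Int) <<< (((3:Int).toNat : Nat) : Int)) = 2^3 := by decide
  have h2 : ((1:Int) <<< (((2:Int).toNat : Nat) : Int)) = 2^2 := by decide
  have h1 : ((1:Int) <<< (((1:Int).toNat : Nat) : Int)) = 2^1 := by decide
  have h0 : ((1:Int) <<< (((0:Int).toNat : Nat) : Int)) = 2^0 := by decide
  rw [h7, h6, h5, h4, h3, h2, h1, h0,
    pvBandPow b 7 (by omega), pvBandPow b 6 (by omega), pvBandPow b 5 (by omega),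
    pvBandPow b 4 (by omega), pvBandPow b 3 (by omega), pvBandPow b 2 (by omega),
    pvBandPow b 1 (by omega), pvBandPow b 0 (by omega)]
  have := pvByteA ((b % 256).toNat) hr
  have hmap : ∀ (l1 : List String) (l2 : List Char),
      l1.map String.toList = l2.map (fun c => [c]) → l1 = l2.map (fun c => String.ofList [c]) := by
    intro l1 l2 h
    have : l1 = (l1.map String.toList).map String.ofList := by
      rw [List.map_map]
      conv_lhs => rw [← List.map_id l1]
      exact List.map_congr_left (fun (s : String) _ => (@String.ofList_toList s).symm)
    rw [this, h, List.map_map]; rfl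
  apply hmap
  norm_num at this ⊢
  exact this

theorem pvSlice_map {α β : Type} (f : α → β) (xs : List α) (a b : Option Int) :
    PySem.List.slice (xs.map f) a b = (PySem.List.slice xs a b).map f := by
  unfold PySem.List.slice
  simp [List.length_map, List.map_take, List.map_drop]

theorem pvJoin (l : List Char) :
    PySem.Str.join "" (l.map (fun c => String.ofList [c])) = String.ofList l := by
  rw [PySem.Str.join]
  congr 1
  rw [List.map_map]
  have : (String.toList ∘ fun c => String.ofList [c]) = (fun c => [c]) := by
    funext c; simp
  rw [this]
  have he : ("" : String).toList = [] := by decide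
  rw [he, PySem.Chars.join_nil_singletons]

theorem pvA_chars (payload : List Int) (padding_bits : Int) :
    unpack_bytes_py payload padding_bits =
      String.ofList (let chars := payload.flatMap (fun b => pvBin 8 ((b % 256).toNat));
        if padding_bits ≠ 0 then PySem.List.slice chars none (some (-padding_bits)) else chars) := by
  unfold unpack_bytes_py
  simp only [PySem.List.foldl_append_eq_flatMap, ← List.map_eq_flatMap]
  simp only [pvStrs]
  rw [← List.map_flatMap]
  by_cases hp : padding_bits ≠ 0
  · simp only [List.nil_append, if_pos hp, pvSlice_map, pvJoin]
  · simp only [List.nil_append, if_neg hp, pvJoin]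

theorem pvB_chars (payload : List Int) (padding_bits : Int) :
    unpack_bytes_py_alt payload padding_bits =
      String.ofList (let chars := payload.flatMap (fun b => pvBin 8 ((b % 256).toNat));
        if padding_bits ≠ 0 then PySem.List.slice chars none (some (-padding_bits)) else chars) := by
  unfold unpack_bytes_py_alt
  simp only [pvBand255]
  have hbits : (if payload.length = 0 then []
      else PySem.Chars.zfill (PySem.Int.toBinChars (pvF payload)) (8 * (payload.length : Int)))
      = payload.flatMap (fun b => pvBin 8 ((b % 256).toNat)) := by
    by_cases hn : payload.length = 0
    · rw [if_pos hn]
      rw [List.length_eq_zero_iff] at hn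
      subst hn; simp
    · rw [if_neg hn]
      obtain ⟨hb1, hb2⟩ := pvF_bounds payload
      have hpow : (pvF payload).toNat < 2^(8 * payload.length) := by
        have h1 : ((256:Int))^payload.length = ((2:Int))^(8 * payload.length) := by
          rw [pow_mul]; norm_num
        have h2 : pvF payload < 2^(8*payload.length) := h1 ▸ hb2
        have h3 : ((2:Int))^(8*payload.length) = ((2^(8*payload.length) : Nat) : Int) := by push_cast; ring
        omega
      have hW : 1 ≤ 8 * payload.length := by omega
      have htb : PySem.Int.toBinChars (pvF payload) = pvMinBits ((pvF payload).toNat) := by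
        rw [PySem.Int.toBinChars, if_neg (by omega), pvToDigits_eq]
      obtain ⟨hrep, hle⟩ := pvBin_eq_replicate (8 * payload.length) ((pvF payload).toNat) hpow hW
      rw [htb, pvZfill_digits _ _ (pvMinBits_ne_nil _) (pvMinBits_mem _)]
      have hWt : ((8 * (payload.length : Int))).toNat = 8 * payload.length := by omega
      rw [hWt, ← hrep, pvF_bin payload (by intro h; subst h; simp at hn)]
  rw [show List.foldl (fun v b => v * 256 + b % 256) 0 payload = pvF payload from rfl, hbits]
  rfl

-- ===== VERDICT (by name: the statement is the Claim_ definition above) =====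
theorem unpack_bytes_py_spec : Claim_equal_unpack_bytes_py := by
  intro payload padding_bits _
  show unpack_bytes_py payload padding_bits = unpack_bytes_py_alt payload padding_bits
  rw [pvA_chars, pvB_chars]
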